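-- pv_equiv track=rewrite | github.com/GeorgianBadita/algorithmic-problems | CodeForces/EvenSubsetSumProblem/EvenSubsetSumProblem.py | solve
-- ===== SOURCE A (Python) =====
-- def solve(array):
--
--     even = []
--     odd = []
--
--     for i in range(len(array)):
--         if array[i] % 2 == 0:
--             even.append(i)
--         else:
--             odd.append(i)
--
--     if even:
--         return f"1\n{even[-1] + 1}"
--
--     if len(odd) > 1:
--         return f"2\n{odd[-1] + 1} {odd[-2] + 1}"
--     else:
--         return "-1"
-- ===== SOURCE B (Python) =====
-- def solve(array):
--     o1 = o2 = -1
--     for i in range(len(array) - 1, -1, -1):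
--         if array[i] % 2 == 0:
--             return f"1\n{i + 1}"
--         if o1 == -1:
--             o1 = i
--         elif o2 == -1:
--             o2 = i
--     if o2 != -1:
--         return f"2\n{o1 + 1} {o2 + 1}"
--     return "-1"
-- ===== Notes on version B (the rewrite author's own statement) =====
-- stated objective: simpler
-- what changed: Replaces the two accumulated index lists and negative-index lookups with a single right-to-left scan that returns at the first even element and keeps only the first two odd indices seen in two scalars.
import Mathlib
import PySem

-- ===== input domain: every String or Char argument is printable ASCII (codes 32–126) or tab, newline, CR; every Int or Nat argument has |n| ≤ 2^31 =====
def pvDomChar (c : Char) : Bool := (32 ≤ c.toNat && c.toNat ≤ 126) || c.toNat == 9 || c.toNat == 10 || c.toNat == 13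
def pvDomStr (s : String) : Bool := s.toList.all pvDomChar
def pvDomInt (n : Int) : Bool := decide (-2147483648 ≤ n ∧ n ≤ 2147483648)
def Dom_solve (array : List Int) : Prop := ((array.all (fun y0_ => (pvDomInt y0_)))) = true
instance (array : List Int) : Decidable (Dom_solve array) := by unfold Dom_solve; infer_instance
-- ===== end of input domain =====

-- B changes A's structure: one right-to-left scan with early exit and two scalar
-- odd-index trackers instead of building two index lists (objective: simpler).

-- shared transliteration of Python's test 'array[i] % 2 == 0' on an (index, value) pair
def pvEven (ix : Int × Int) : Bool := PySem.Int.mod ix.2 2 == 0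

-- ===== PORT A =====
-- A's loop body: append the index to the even or to the odd list.
def stepA (p : List Int × List Int) (ix : Int × Int) : List Int × List Int :=
  if pvEven ix then (p.1 ++ [ix.1], p.2) else (p.1, p.2 ++ [ix.1])

-- 'for i in range(len(array)): … array[i] …' ported as a fold over
-- PySem.List.enumerate array 0 (same traversal: index together with element).
def solve (array : List Int) : String :=
  let eo := (PySem.List.enumerate array 0).foldl stepA ([], [])
  if eo.1 ≠ [] then
    "1\n" ++ PySem.Int.toStr (PySem.List.pyGetD eo.1 (-1) 0 + 1)
  else if 1 < eo.2.length then
    "2\n" ++ PySem.Int.toStr (PySem.List.pyGetD eo.2 (-1) 0 + 1) ++ " " ++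
      PySem.Int.toStr (PySem.List.pyGetD eo.2 (-2) 0 + 1)
  else "-1"

-- ===== PORT B =====
-- One pass over the (index, value) pairs from the right, early return on the
-- first even value; o1/o2 are the Python scalars with sentinel -1.
def solveAltGo : List (Int × Int) → Int → Int → String
  | [], o1, o2 =>
      if o2 ≠ -1 then
        "2\n" ++ PySem.Int.toStr (o1 + 1) ++ " " ++ PySem.Int.toStr (o2 + 1)
      else "-1"
  | ix :: rest, o1, o2 =>
      if pvEven ix then "1\n" ++ PySem.Int.toStr (ix.1 + 1)
      else if o1 == -1 then solveAltGo rest ix.1 o2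
      else if o2 == -1 then solveAltGo rest o1 ix.1
      else solveAltGo rest o1 o2

def solve_alt (array : List Int) : String :=
  solveAltGo (PySem.List.enumerate array 0).reverse (-1) (-1)

-- ===== PRECONDITION & SPEC =====
def Spec_solve (array : List Int) (out : String) : Prop := out = solve_alt array
instance (array : List Int) (out : String) : Decidable (Spec_solve array out) := by unfold Spec_solve; infer_instance

-- ===== CLAIM (what is proved, stated in full; the proofs are below) =====
def Claim_equal_solve : Prop := ∀ (array : List Int), Dom_solve array → Spec_solve array (solve array)

-- ===== LEMMAS AND PROOFS =====

-- A's loop appends each index to the even or the odd list: the fold is the two filters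
theorem foldA_eq (l : List (Int × Int)) (e o : List Int) :
    l.foldl stepA (e, o)
      = (e ++ (l.filter pvEven).map (·.1), o ++ (l.filter (fun ix => !pvEven ix)).map (·.1)) := by
  induction l generalizing e o with
  | nil => simp
  | cons y ys ih =>
      rw [List.foldl_cons]
      cases h : pvEven y with
      | true =>
          rw [show stepA (e, o) y = (e ++ [y.1], o) from by unfold stepA; rw [if_pos h], ih]
          simp [h]
      | false =>
          rw [show stepA (e, o) y = (e, o ++ [y.1]) from by
                unfold stepA; rw [if_neg (by simp [h])], ih]
          simp [h]

-- B returns "1\n{i+1}" at the first even pair, whatever o1 / o2 hold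
theorem goB_even (pre : List (Int × Int)) (y0 : Int × Int) (post : List (Int × Int))
    (hpre : ∀ z ∈ pre, pvEven z = false) (hy : pvEven y0 = true) :
    ∀ o1 o2, solveAltGo (pre ++ y0 :: post) o1 o2 = "1\n" ++ PySem.Int.toStr (y0.1 + 1) := by
  induction pre with
  | nil => intro o1 o2; simp [solveAltGo, hy]
  | cons z zs ih =>
      intro o1 o2
      have hz : pvEven z = false := hpre z (by simp)
      have hih := ih (fun w hw => hpre w (by simp [hw]))
      simp only [List.cons_append, solveAltGo, hz, Bool.false_eq_true, if_false]
      split_ifs <;> exact hih _ _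

-- once both odd slots are set (≠ -1) and no even pair remains, B returns "2\n{o1+1} {o2+1}"
theorem goB_run (l : List (Int × Int)) (o1 o2 : Int)
    (hl : ∀ y ∈ l, pvEven y = false) (h1 : o1 ≠ -1) (h2 : o2 ≠ -1) :
    solveAltGo l o1 o2
      = "2\n" ++ PySem.Int.toStr (o1 + 1) ++ " " ++ PySem.Int.toStr (o2 + 1) := by
  induction l with
  | nil => simp [solveAltGo, h2]
  | cons y ys ih =>
      have hy : pvEven y = false := hl y (by simp)
      simp only [solveAltGo, hy, Bool.false_eq_true, if_false, beq_iff_eq,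
        if_neg h1, if_neg h2]
      exact ih (fun z hz => hl z (by simp [hz]))

-- split a list at its first even pair
theorem splitFirstEven (m : List (Int × Int)) (hm : m.filter pvEven ≠ []) :
    ∃ tw y0 rest, m = tw ++ y0 :: rest ∧ (∀ z ∈ tw, pvEven z = false) ∧
      pvEven y0 = true ∧ m.filter pvEven = y0 :: rest.filter pvEven := by
  induction m with
  | nil => simp at hm
  | cons y ys ih =>
      cases h : pvEven y with
      | true =>
          exact ⟨[], y, ys, by simp, by simp, h, by simp [h]⟩
      | false =>
          have hys : ys.filter pvEven ≠ [] := by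
            simpa [List.filter_cons, h] using hm
          obtain ⟨tw, y0, rest, h1, h2, h3, h4⟩ := ih hys
          exact ⟨y :: tw, y0, rest, by simp [h1], by
              intro z hz
              rcases List.mem_cons.1 hz with rfl | hz'
              · exact h
              · exact h2 z hz', h3, by simp [h, h4]⟩

-- ===== VERDICT (by name: the statement is the Claim_ definition above) =====
theorem solve_spec : Claim_equal_solve := by
  intro array _
  unfold Spec_solve solve solve_alt
  set l := PySem.List.enumerate array 0 with hl
  rw [foldA_eq]
  by_cases hF : l.filter pvEven = []
  · -- no even element at all
    have hall : ∀ y ∈ l, pvEven y = false := by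
      intro y hy
      by_contra h
      have : y ∈ l.filter pvEven := List.mem_filter.2 ⟨hy, by simpa using h⟩
      simp [hF] at this
    have hallr : ∀ y ∈ l.reverse, pvEven y = false := fun y hy =>
      hall y (List.mem_reverse.1 hy)
    have hfilt : l.filter (fun ix => !pvEven ix) = l :=
      List.filter_eq_self.2 (fun y hy => by simp [hall y hy])
    have hfst : l.map (·.1) = PySem.List.pyRange 0 (array.length : Int) 1 := by
      simpa using PySem.List.map_fst_enumerate array 0
    have hlen : l.length = array.length := by
      rw [hl]; simp
    simp only [hF, hfilt, List.map_nil, List.nil_append, ne_eq, not_true_eq_false,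
      if_false, hfst]
    have hlenp : (PySem.List.pyRange 0 (array.length : Int) 1).length = array.length := by
      simp [PySem.List.length_pyRange_one]
    by_cases hn : 1 < array.length
    · -- at least two elements, all odd
      rw [if_pos (by rw [hlenp]; exact hn)]
      have hnn : (1 : Int) < (array.length : Int) := by exact_mod_cast hn
      rcases hrl : l.reverse with _ | ⟨y1, tl⟩
      · exfalso
        have : l.length = 0 := by simpa using congrArg List.length hrl
        omega
      rcases htl : tl with _ | ⟨y2, rest⟩
      · exfalso
        have : l.length = 1 := by
          simpa [htl] using congrArg List.length hrl
        omega
      subst htl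
      have hmapr : List.map (fun x => x.1) (y1 :: y2 :: rest)
          = (PySem.List.pyRange 0 (array.length : Int) 1).reverse := by
        rw [← hrl, List.map_reverse]
        exact congrArg List.reverse hfst
      have hrev : (PySem.List.pyRange 0 (array.length : Int) 1).reverse
          = PySem.List.pyRange ((array.length : Int) - 1) (-1) (-1) := by
        rw [PySem.List.pyRange_neg_one_eq_reverse]; norm_num
      rw [hrev, PySem.List.pyRange_neg_one_cons (by omega),
          PySem.List.pyRange_neg_one_cons (by omega)] at hmapr
      simp only [List.map_cons, List.cons.injEq] at hmapr
      obtain ⟨hy1v, hy2v, -⟩ := hmapr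
      have hy1 : pvEven y1 = false := hallr y1 (by rw [hrl]; simp)
      have hy2 : pvEven y2 = false := hallr y2 (by rw [hrl]; simp)
      have hrest : ∀ z ∈ rest, pvEven z = false := fun z hz =>
        hallr z (by rw [hrl]; simp [hz])
      simp only [solveAltGo, hy1, hy2, Bool.false_eq_true, if_false, beq_iff_eq]
      rw [if_pos trivial, if_neg (show ¬ y1.1 = -1 by omega), if_pos trivial,
          goB_run rest y1.1 y2.1 hrest (by omega) (by omega)]
      rw [PySem.List.pyGetD_neg_ofNat _ 1 0 (by omega) (by omega),
          PySem.List.pyGetD_neg_ofNat _ 2 0 (by omega) (by omega),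
          PySem.List.getElem_pyRange_one, PySem.List.getElem_pyRange_one]
      simp only [hlenp]
      have e1 : (0 : Int) + ((array.length - 1 : Nat) : Int) + 1 = y1.1 + 1 := by
        push_cast [hy1v]; omega
      have e2 : (0 : Int) + ((array.length - 2 : Nat) : Int) + 1 = y2.1 + 1 := by
        push_cast [hy2v]; omega
      rw [e1, e2]
    · -- zero or one element, all odd: both sides give "-1"
      rw [if_neg (by rw [hlenp]; exact hn)]
      rcases hl0 : l with _ | ⟨z, _ | ⟨w, more⟩⟩
      · simp [solveAltGo]
      · have hz : pvEven z = false := hall z (by rw [hl0]; simp)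
        simp [solveAltGo, hz]
      · exfalso
        have : 2 ≤ l.length := by rw [hl0]; simp
        omega
  · -- there is an even element
    obtain ⟨tw, y0, rest, hsplit, htw, hy0, hfe⟩ :=
      splitFirstEven l.reverse (by
        rw [List.filter_reverse]
        simpa using hF)
    have hB : solveAltGo l.reverse (-1) (-1) = "1\n" ++ PySem.Int.toStr (y0.1 + 1) := by
      rw [hsplit]; exact goB_even tw y0 rest htw hy0 (-1) (-1)
    have hfl : l.filter pvEven = (rest.filter pvEven).reverse ++ [y0] := by
      have h1 : (l.filter pvEven).reverse = y0 :: rest.filter pvEven := by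
        rw [← List.filter_reverse]; exact hfe
      rw [← List.reverse_reverse (l.filter pvEven), h1]; simp
    have heven : (l.filter pvEven).map (·.1)
        = ((rest.filter pvEven).reverse.map (·.1)) ++ [y0.1] := by
      rw [hfl]; simp
    have hne : ([] : List Int) ++ (l.filter pvEven).map (·.1) ≠ [] := by
      simp [hfl]
    rw [hB, if_pos hne]
    simp only [List.nil_append, heven, PySem.List.pyGetD_neg_one_append_singleton]
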